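-- pv_equiv track=rewrite | github.com/Omar-Helmy-Portfolio/Omar-Helmy-Portfolio | CS50 Python Exercises/plates.py | punct
-- ===== SOURCE A (Python) =====
-- import string
--
-- def punct(s):
--     for symb in string.punctuation:
--         if symb in s or " " in s:
--             check = False
--             break
--         else:
--             check = True
--     return check
-- ===== SOURCE B (Python) =====
-- import string
--
-- _FORBIDDEN = set(string.punctuation) | {" "}
--
-- def punct(s):
--     return not any(c in _FORBIDDEN for c in s)
-- ===== Notes on version B (the rewrite author's own statement) =====
-- stated objective: idiomatic
-- what changed: B builds the forbidden set (punctuation plus space) once and makes a single pass over s with any(), instead of A's loop over the punctuation table testing substring membership in s for each symbol.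
import Mathlib
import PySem

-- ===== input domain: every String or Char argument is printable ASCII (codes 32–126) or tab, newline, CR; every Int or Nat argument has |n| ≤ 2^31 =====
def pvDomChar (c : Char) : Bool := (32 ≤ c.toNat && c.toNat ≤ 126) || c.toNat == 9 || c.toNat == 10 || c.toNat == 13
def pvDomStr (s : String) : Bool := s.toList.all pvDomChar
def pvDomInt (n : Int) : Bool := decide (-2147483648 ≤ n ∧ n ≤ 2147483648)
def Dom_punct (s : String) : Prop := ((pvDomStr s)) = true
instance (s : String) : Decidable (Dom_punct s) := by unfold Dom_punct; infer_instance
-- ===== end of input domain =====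

-- B iterates once over s against a precomputed forbidden set instead of A's scan of s per punctuation symbol; objective: idiomatic.

-- ===== PORT A =====
-- string.punctuation as a list of characters
def punctuationChars : List Char := "!\"#$%&'()*+,-./:;<=>?@[\\]^_`{|}~".toList

-- the for-loop over string.punctuation with its break; each symbol is a single
-- character, so Python's substring test `symb in s` is character membership (exact here)
def punctLoop (l : List Char) : List Char → Bool
  | [] => true
  | p :: ps => if p ∈ l ∨ ' ' ∈ l then false else punctLoop l ps

def punct (s : String) : Bool := punctLoop s.toList punctuationChars

-- ===== PORT B =====
-- forbidden = set(string.punctuation) | {" "}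
def forbiddenSet : PySem.Set Char := PySem.Set.add (PySem.Set.ofList punctuationChars) ' '

-- not any(c in forbidden for c in s)
def punct_alt (s : String) : Bool := !(s.toList.any (fun c => PySem.Set.contains forbiddenSet c))

-- ===== PRECONDITION & SPEC =====
def Spec_punct (s : String) (out : Bool) : Prop := out = punct_alt s
instance (s : String) (out : Bool) : Decidable (Spec_punct s out) := by unfold Spec_punct; infer_instance

-- ===== CLAIM (what is proved, stated in full; the proofs are below) =====
def Claim_equal_punct : Prop := ∀ (s : String), Dom_punct s → Spec_punct s (punct s)

-- ===== LEMMAS AND PROOFS =====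

lemma mem_forbidden (c : Char) :
    PySem.Set.contains forbiddenSet c = (decide (c ∈ punctuationChars) || decide (c = ' ')) := by
  rw [Bool.eq_iff_iff]
  simp [forbiddenSet, PySem.Set.mem_add, PySem.Set.mem_ofList]

lemma punctLoop_no_space (l : List Char) (h : ' ' ∉ l) (ps : List Char) :
    punctLoop l ps = ps.all (fun p => !(decide (p ∈ l))) := by
  induction ps with
  | nil => rfl
  | cons p ps ih =>
    simp only [punctLoop, List.all_cons, ih]
    by_cases hp : p ∈ l <;> simp [hp, h]

theorem punct_spec : Claim_equal_punct := by
  intro s _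
  unfold Spec_punct punct punct_alt
  by_cases hsp : ' ' ∈ s.toList
  · have h1 : punctLoop s.toList punctuationChars = false := by
      simp [punctuationChars, punctLoop, hsp]
    have h2 : s.toList.any (fun c => PySem.Set.contains forbiddenSet c) = true := by
      refine List.any_eq_true.2 ⟨' ', hsp, ?_⟩
      rw [mem_forbidden]; simp
    rw [h1, h2]; rfl
  · rw [punctLoop_no_space s.toList hsp]
    rw [Bool.eq_iff_iff]
    simp only [List.all_eq_true, Bool.not_eq_true', Bool.not_eq_true, List.any_eq_false,
      mem_forbidden, decide_eq_false_iff_not, Bool.or_eq_false_iff, decide_eq_false_iff_not]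
    constructor
    · intro h c hc
      refine ⟨fun hcp => absurd hc (by simpa using h c hcp), fun he => hsp (he ▸ hc)⟩
    · intro h p hp hpl
      exact (h p hpl).1 hp
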